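-- pv_equiv track=rewrite | github.com/NightQnEarth/SudokuSolver | Package/ExtractInputData.py | check_correct_size
-- ===== SOURCE A (Python) =====
-- def is_square(number):
--     if number in {0, 1, 4, 9}:
--         return True
--     elif number > 9:
--         for i in range(number // 2):
--             if i**2 == number:
--                 return True
--     return False
--
-- def check_correct_size(puzzle):
--     row_count = len(puzzle)
--     if row_count == 0 or not is_square(row_count):
--         return False
--     for row in puzzle:
--         if len(row) != row_count:
--             return False
--     return True
-- ===== SOURCE B (Python) =====
-- def check_correct_size(puzzle):
--     n = len(puzzle)
--     if n == 0:
--         return False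
--     lo, hi = 0, n
--     found = False
--     while lo <= hi:
--         mid = (lo + hi) // 2
--         if mid * mid == n:
--             found = True
--             break
--         elif mid * mid < n:
--             lo = mid + 1
--         else:
--             hi = mid - 1
--     if not found:
--         return False
--     return all(len(row) == n for row in puzzle)
-- ===== Notes on version B (the rewrite author's own statement) =====
-- stated objective: alternative
-- what changed: replaces the linear scan over range(n//2) for an exact square root with an integer binary search on [0, n] and folds the row-length loop into one all()
import Mathlib
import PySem

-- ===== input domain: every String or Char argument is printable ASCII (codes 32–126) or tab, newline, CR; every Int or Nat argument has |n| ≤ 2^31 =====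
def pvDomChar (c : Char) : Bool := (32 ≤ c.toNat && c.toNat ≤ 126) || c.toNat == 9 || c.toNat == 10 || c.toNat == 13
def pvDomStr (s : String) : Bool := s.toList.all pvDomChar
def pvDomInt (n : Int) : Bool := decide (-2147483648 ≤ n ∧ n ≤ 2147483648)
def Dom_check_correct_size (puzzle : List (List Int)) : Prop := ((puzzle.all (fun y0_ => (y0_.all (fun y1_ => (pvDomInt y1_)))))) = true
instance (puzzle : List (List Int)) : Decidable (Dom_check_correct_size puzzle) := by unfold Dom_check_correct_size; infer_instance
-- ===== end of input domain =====

-- B decides the perfect-square test by an integer binary search on [0, n] instead of A's linear scan over range(n//2) (alternative algorithm; row-length check dominates, so same measured cost).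

-- ===== PORT A =====
-- is_square: membership test, then linear scan i in range(number // 2) for i*i == number.
-- lengths are Nat; range over a nonnegative bound is exactly List.range.
def is_square_A (number : Nat) : Bool :=
  if number = 0 ∨ number = 1 ∨ number = 4 ∨ number = 9 then true
  else if number > 9 then
    (List.range (number / 2)).any (fun i => i * i == number)
  else false

def check_correct_size (puzzle : List (List Int)) : Bool :=
  let row_count := puzzle.length
  if row_count = 0 ∨ ¬ is_square_A row_count then false
  else puzzle.all (fun row => row.length == row_count)

-- ===== PORT B =====
-- the while-loop of Source B: binary search for an exact integer square root of n in [lo, hi].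
-- Fuel n+1 = hi+1-lo bounds the iteration count (the interval shrinks each step), making the
-- recursion structural; Python's `hi = mid - 1` can only run with mid ≥ 1, so Nat subtraction is exact.
def bsearch_sqrt (n : Nat) : Nat → Nat → Nat → Bool
  | 0, _, _ => false
  | fuel + 1, lo, hi =>
    if lo ≤ hi then
      if (lo + hi) / 2 * ((lo + hi) / 2) = n then true
      else if (lo + hi) / 2 * ((lo + hi) / 2) < n then bsearch_sqrt n fuel ((lo + hi) / 2 + 1) hi
      else bsearch_sqrt n fuel lo ((lo + hi) / 2 - 1)
    else false

def check_correct_size_alt (puzzle : List (List Int)) : Bool :=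
  let n := puzzle.length
  if n = 0 then false
  else if bsearch_sqrt n (n + 1) 0 n then puzzle.all (fun row => row.length == n)
  else false

-- ===== PRECONDITION & SPEC =====
def Spec_check_correct_size (puzzle : List (List Int)) (out : Bool) : Prop := out = check_correct_size_alt puzzle
instance (puzzle : List (List Int)) (out : Bool) : Decidable (Spec_check_correct_size puzzle out) := by unfold Spec_check_correct_size; infer_instance

-- ===== CLAIM (what is proved, stated in full; the proofs are below) =====
def Claim_equal_check_correct_size : Prop := ∀ (puzzle : List (List Int)), Dom_check_correct_size puzzle → Spec_check_correct_size puzzle (check_correct_size puzzle)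

-- ===== LEMMAS AND PROOFS =====

lemma isq_iff (n : Nat) : is_square_A n = true ↔ ∃ r, r * r = n := by
  unfold is_square_A
  split_ifs with h1 h2
  · simp only [true_iff]
    rcases h1 with rfl | rfl | rfl | rfl
    · exact ⟨0, rfl⟩
    · exact ⟨1, rfl⟩
    · exact ⟨2, rfl⟩
    · exact ⟨3, rfl⟩
  · simp only [List.any_eq_true, List.mem_range, beq_iff_eq]
    constructor
    · rintro ⟨i, _, hi⟩; exact ⟨i, hi⟩
    · rintro ⟨r, hr⟩
      refine ⟨r, ?_, hr⟩
      have hr4 : 4 ≤ r := by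
        by_contra hc
        push_neg at hc
        interval_cases r <;> omega
      have h4r : 4 * r ≤ r * r := Nat.mul_le_mul_right r hr4
      omega
  · push_neg at h2
    simp only [false_iff, not_exists]
    intro r hr
    have hr3 : r ≤ 3 := by
      by_contra hc
      push_neg at hc
      have : 4 * 4 ≤ r * r := Nat.mul_le_mul hc hc
      omega
    interval_cases r <;> omega

lemma bsearch_iff (n : Nat) : ∀ (fuel lo hi : Nat), hi + 1 - lo ≤ fuel →
    (bsearch_sqrt n fuel lo hi = true ↔ ∃ r, lo ≤ r ∧ r ≤ hi ∧ r * r = n) := by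
  intro fuel
  induction fuel with
  | zero =>
    intro lo hi hf
    simp only [bsearch_sqrt]
    constructor
    · intro hc; exact absurd hc (by simp)
    · rintro ⟨r, h1, h2, _⟩; omega
  | succ fuel ih =>
    intro lo hi hf
    simp only [bsearch_sqrt]
    by_cases h : lo ≤ hi
    · rw [if_pos h]
      by_cases heq : (lo + hi) / 2 * ((lo + hi) / 2) = n
      · rw [if_pos heq]
        simp only [true_iff]
        exact ⟨(lo + hi) / 2, by omega, by omega, heq⟩
      · rw [if_neg heq]
        by_cases hlt : (lo + hi) / 2 * ((lo + hi) / 2) < n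
        · rw [if_pos hlt, ih ((lo + hi) / 2 + 1) hi (by omega)]
          constructor
          · rintro ⟨r, h1, h2, h3⟩; exact ⟨r, by omega, h2, h3⟩
          · rintro ⟨r, h1, h2, h3⟩
            refine ⟨r, ?_, h2, h3⟩
            by_contra hc
            push_neg at hc
            have hrm : r ≤ (lo + hi) / 2 := by omega
            have := Nat.mul_le_mul hrm hrm
            omega
        · rw [if_neg hlt]
          have hm : (lo + hi) / 2 ≠ 0 := by
            intro h0
            rw [h0] at heq hlt
            simp at heq hlt
            omega
          rw [ih lo ((lo + hi) / 2 - 1) (by omega)]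
          have hgt : n < (lo + hi) / 2 * ((lo + hi) / 2) := by omega
          constructor
          · rintro ⟨r, h1, h2, h3⟩; exact ⟨r, h1, by omega, h3⟩
          · rintro ⟨r, h1, h2, h3⟩
            refine ⟨r, h1, ?_, h3⟩
            have hrm : r < (lo + hi) / 2 := by
              by_contra hc
              push_neg at hc
              have := Nat.mul_le_mul hc hc
              omega
            omega
    · rw [if_neg h]
      constructor
      · intro hc; exact absurd hc (by simp)
      · rintro ⟨r, h1, h2, _⟩; omega

lemma sq_test_eq (n : Nat) : is_square_A n = bsearch_sqrt n (n + 1) 0 n := by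
  apply Bool.eq_iff_iff.mpr
  rw [isq_iff, bsearch_iff n (n + 1) 0 n (by omega)]
  constructor
  · rintro ⟨r, hr⟩
    refine ⟨r, Nat.zero_le r, ?_, hr⟩
    rcases Nat.eq_zero_or_pos r with rfl | hpos
    · omega
    · have : 1 * r ≤ r * r := Nat.mul_le_mul_right r hpos
      omega
  · rintro ⟨r, _, _, hr⟩; exact ⟨r, hr⟩

-- ===== VERDICT (by name: the statement is the Claim_ definition above) =====
theorem check_correct_size_spec : Claim_equal_check_correct_size := by
  intro puzzle _
  unfold Spec_check_correct_size check_correct_size check_correct_size_alt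
  by_cases h0 : puzzle.length = 0
  · simp [h0]
  · simp only [h0, false_or, if_false]
    rw [sq_test_eq puzzle.length]
    by_cases hb : bsearch_sqrt puzzle.length (puzzle.length + 1) 0 puzzle.length <;> simp [hb]
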